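-- pv_equiv track=rewrite | github.com/saeoki/Algorithm | 프로그래머스/1/134240. 푸드 파이트 대회/푸드 파이트 대회.py | solution
-- ===== SOURCE A (Python) =====
-- def solution(food):
--     result = ''
--     for i in range(1, len(food)) :
--         food_div = food[i]//2
--         for j in range(food_div) :
--             result += str(i)
--
--     reverse_result = ''.join(sorted(result, reverse=1))
--     result += '0'
--     result += reverse_result
--
--     return result
-- ===== SOURCE B (Python) =====
-- def solution(food):
--     # Counting-sort construction: tally digit characters once, build the
--     # descending mirror directly instead of sorting the left half.
--     counts = [0] * 10
--     parts = []
--     for i in range(1, len(food)):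
--         k = food[i] // 2
--         if k > 0:
--             s = str(i)
--             parts.append(s * k)
--             for ch in s:
--                 counts[ord(ch) - 48] += k
--     left = ''.join(parts)
--     right = ''.join(str(d) * counts[d] for d in range(9, -1, -1))
--     return left + '0' + right
-- ===== Notes on version B (the rewrite author's own statement) =====
-- stated objective: faster
-- what changed: Replaces the character-by-character string concatenation plus comparison sort of the left half by a single pass that tallies digit characters into a 10-slot counter and emits the descending mirror by counting sort.
import Mathlib
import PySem

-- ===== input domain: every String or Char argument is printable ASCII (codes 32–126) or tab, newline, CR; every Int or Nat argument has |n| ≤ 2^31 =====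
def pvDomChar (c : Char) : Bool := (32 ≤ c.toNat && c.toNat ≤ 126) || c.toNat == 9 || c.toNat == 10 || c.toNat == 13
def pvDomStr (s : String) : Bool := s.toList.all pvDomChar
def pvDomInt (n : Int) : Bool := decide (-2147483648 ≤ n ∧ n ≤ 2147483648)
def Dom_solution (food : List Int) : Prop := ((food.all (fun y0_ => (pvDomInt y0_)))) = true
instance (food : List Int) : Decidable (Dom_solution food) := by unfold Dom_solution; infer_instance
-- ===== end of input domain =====

-- B replaces A's comparison sort of the mirror half by a counting-sort tally of digit characters; equal return value on every input.

-- ===== PORT A =====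
-- result is kept as a List Char and packed into a String at the end.
def solution (food : List Int) : String :=
  -- result = ''; for i in range(1, len(food)): for j in range(food[i]//2): result += str(i)
  let result : List Char :=
    (PySem.List.pyRange 1 (food.length : Int) 1).foldl (fun result i =>
      let food_div := PySem.Int.floordiv (PySem.List.pyGetD food i 0) 2
      (PySem.List.pyRange 0 food_div 1).foldl (fun result _j => result ++ PySem.Int.toChars i) result) []
  -- reverse_result = ''.join(sorted(result, reverse=1))
  let reverse_result := PySem.List.sorted result (fun c => c) true
  -- result += '0'; result += reverse_result
  String.ofList ((result ++ ['0']) ++ reverse_result)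

-- ===== PORT B =====
-- state = (counts, parts); counts[ord(ch)-48] is always an in-range index (ch is a decimal
-- digit of i ≥ 1), so List.getD/List.set are exact for the Python list read/write there.
def solution_alt (food : List Int) : String :=
  let st :=
    (PySem.List.pyRange 1 (food.length : Int) 1).foldl (fun st i =>
      let k := PySem.Int.floordiv (PySem.List.pyGetD food i 0) 2
      if 0 < k then
        let s := PySem.Int.toChars i
        (s.foldl (fun c ch => c.set (ch.toNat - 48) (c.getD (ch.toNat - 48) 0 + k)) st.1,
         st.2 ++ [PySem.List.pyRepeat s k])
      else st)
      (List.replicate 10 (0 : Int), ([] : List (List Char)))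
  let left := st.2.flatten
  let right := (PySem.List.pyRange 9 (-1) (-1)).foldl
      (fun acc d => acc ++ PySem.List.pyRepeat (PySem.Int.toChars d) (st.1.getD d.toNat 0)) []
  String.ofList ((left ++ ['0']) ++ right)

-- ===== PRECONDITION & SPEC =====
def Spec_solution (food : List Int) (out : String) : Prop := out = solution_alt food
instance (food : List Int) (out : String) : Decidable (Spec_solution food out) := by unfold Spec_solution; infer_instance

-- ===== CLAIM (what is proved, stated in full; the proofs are below) =====
def Claim_equal_solution : Prop := ∀ (food : List Int), Dom_solution food → Spec_solution food (solution food)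

-- ===== LEMMAS AND PROOFS =====
def kOf (food : List Int) (i : Int) : Int := PySem.Int.floordiv (PySem.List.pyGetD food i 0) 2
def repOf (food : List Int) (i : Int) : List Char := PySem.List.pyRepeat (PySem.Int.toChars i) (kOf food i)
def leftOf (food : List Int) : List Char := (PySem.List.pyRange 1 (food.length : Int) 1).flatMap (repOf food)

lemma flatMap_const {α β : Type} (l : List α) (s : List β) :
    l.flatMap (fun _ => s) = (List.replicate l.length s).flatten := by
  induction l with
  | nil => rfl
  | cons h t ih => simp [List.replicate_succ, ih]

lemma length_pyRange_zero (k : Int) : (PySem.List.pyRange 0 k 1).length = k.toNat := by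
  rw [PySem.List.pyRange_of_pos 0 k (by norm_num)]; simp; omega

lemma solution_eq (food : List Int) :
    solution food = String.ofList ((leftOf food ++ ['0']) ++
      PySem.List.sorted (leftOf food) (fun c => c) true) := by
  unfold solution
  dsimp only
  have h : ∀ (acc : List Char) (i : Int), i ∈ PySem.List.pyRange 1 (food.length : Int) 1 →
      (PySem.List.pyRange 0 (PySem.Int.floordiv (PySem.List.pyGetD food i 0) 2) 1).foldl
        (fun result _j => result ++ PySem.Int.toChars i) acc = acc ++ repOf food i := by
    intro acc i _
    rw [PySem.List.foldl_append_eq_flatMap (g := fun _ => PySem.Int.toChars i)]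
    rw [flatMap_const, length_pyRange_zero]
    rfl
  have h2 : (PySem.List.pyRange 1 (food.length : Int) 1).foldl
      (fun result i => (PySem.List.pyRange 0 (PySem.Int.floordiv (PySem.List.pyGetD food i 0) 2) 1).foldl
        (fun result _j => result ++ PySem.Int.toChars i) result) [] = leftOf food := by
    rw [PySem.List.foldl_congr_mem _ _ (fun acc i => acc ++ repOf food i) _ h]
    rw [PySem.List.foldl_append_eq_flatMap]
    rfl
  rw [h2]

lemma flatMap_filter_pos (food : List Int) (l : List Int) :
    ((l.filter (fun i => decide (0 < PySem.Int.floordiv (PySem.List.pyGetD food i 0) 2))).map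
      (fun i => PySem.List.pyRepeat (PySem.Int.toChars i)
        (PySem.Int.floordiv (PySem.List.pyGetD food i 0) 2))).flatten
      = l.flatMap (repOf food) := by
  induction l with
  | nil => rfl
  | cons h t ih =>
    by_cases hk : 0 < PySem.Int.floordiv (PySem.List.pyGetD food h 0) 2
    · simp only [List.filter_cons, hk, decide_true, if_true, List.map_cons, List.flatten_cons,
        List.flatMap_cons, ih]
      rfl
    · have hrep : repOf food h = [] := by
        unfold repOf kOf PySem.List.pyRepeat
        have : (PySem.Int.floordiv (PySem.List.pyGetD food h 0) 2).toNat = 0 := by omega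
        rw [this]; rfl
      simp only [List.filter_cons, hk, decide_false, Bool.false_eq_true, if_false,
        List.flatMap_cons, hrep, List.nil_append, ih]

lemma parts_inv (food : List Int) :
    ((PySem.List.pyRange 1 (food.length : Int) 1).foldl (fun p i =>
        let k := PySem.Int.floordiv (PySem.List.pyGetD food i 0) 2
        if 0 < k then p ++ [PySem.List.pyRepeat (PySem.Int.toChars i) k] else p)
      ([] : List (List Char))).flatten = leftOf food := by
  dsimp only
  rw [PySem.List.foldl_append_ite (p := fun i => 0 < PySem.Int.floordiv (PySem.List.pyGetD food i 0) 2)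
      (f := fun i => PySem.List.pyRepeat (PySem.Int.toChars i) (PySem.Int.floordiv (PySem.List.pyGetD food i 0) 2))]
  rw [List.nil_append, flatMap_filter_pos]
  rfl

lemma digitChar_range (m : Nat) (h : m < 10) :
    48 ≤ (Nat.digitChar m).toNat ∧ (Nat.digitChar m).toNat ≤ 57 := by
  interval_cases m <;> decide
lemma toDigitsCore_digits : ∀ (fuel n : Nat) (ds : List Char),
    (∀ c ∈ ds, 48 ≤ c.toNat ∧ c.toNat ≤ 57) →
    ∀ c ∈ Nat.toDigitsCore 10 fuel n ds, 48 ≤ c.toNat ∧ c.toNat ≤ 57 := by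
  intro fuel
  induction fuel with
  | zero => intro n ds hds c hc; simpa [Nat.toDigitsCore] using hds c (by simpa [Nat.toDigitsCore] using hc)
  | succ f ih =>
    intro n ds hds c hc
    rw [Nat.toDigitsCore] at hc
    by_cases h : n / 10 = 0
    · simp [h] at hc
      rcases hc with rfl | hc
      · exact digitChar_range _ (Nat.mod_lt _ (by norm_num))
      · exact hds c hc
    · simp [h] at hc
      exact ih _ _ (by
        intro c' hc'
        rcases List.mem_cons.1 hc' with rfl | hc''
        · exact digitChar_range _ (Nat.mod_lt _ (by norm_num))
        · exact hds c' hc'') c hc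
lemma toChars_digits (i : Int) (hi : 0 ≤ i) :
    ∀ c ∈ PySem.Int.toChars i, 48 ≤ c.toNat ∧ c.toNat ≤ 57 := by
  unfold PySem.Int.toChars
  rw [if_neg (by omega)]
  exact toDigitsCore_digits _ _ _ (by simp)

def cntj (j : Nat) (s : List Char) : Nat := s.countP (fun ch => ch.toNat - 48 == j)

lemma getD_set' (c : List Int) (i j : Nat) (v : Int) (h : i < c.length) :
    (c.set i v).getD j 0 = if i = j then v else c.getD j 0 := by
  simp [List.getD_eq_getElem?_getD, List.getElem?_set, h]
  split <;> simp

lemma inner_counts (k : Int) : ∀ (s : List Char),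
    (∀ ch ∈ s, 48 ≤ ch.toNat ∧ ch.toNat ≤ 57) →
    ∀ (c : List Int), c.length = 10 → ∀ (j : Nat),
    ((s.foldl (fun c ch => c.set (ch.toNat - 48) (c.getD (ch.toNat - 48) 0 + k)) c).getD j 0
        = c.getD j 0 + k * (cntj j s : Int))
    ∧ (s.foldl (fun c ch => c.set (ch.toNat - 48) (c.getD (ch.toNat - 48) 0 + k)) c).length = 10 := by
  intro s
  induction s with
  | nil => intro _ c hc j; simp [cntj, hc]
  | cons ch t ih =>
    intro hs c hc j
    have hch := hs ch (List.mem_cons_self)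
    have hidx : ch.toNat - 48 < c.length := by omega
    have ht : ∀ ch ∈ t, 48 ≤ ch.toNat ∧ ch.toNat ≤ 57 := fun c' hc' => hs c' (List.mem_cons_of_mem _ hc')
    have hlen : (c.set (ch.toNat - 48) (c.getD (ch.toNat - 48) 0 + k)).length = 10 := by
      simpa using hc
    obtain ⟨h1, h2⟩ := ih ht _ hlen j
    refine ⟨?_, by simpa using h2⟩
    rw [List.foldl_cons, h1, getD_set' _ _ _ _ hidx]
    unfold cntj
    by_cases hj : ch.toNat - 48 = j
    · simp [hj]
      ring
    · simp [hj]

lemma outer_counts (food : List Int) : ∀ (l : List Int), (∀ i ∈ l, 0 ≤ i) →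
    ∀ (c : List Int), c.length = 10 → ∀ (j : Nat),
    ((l.foldl (fun c i =>
        if 0 < PySem.Int.floordiv (PySem.List.pyGetD food i 0) 2 then
          (PySem.Int.toChars i).foldl
            (fun c ch => c.set (ch.toNat - 48) (c.getD (ch.toNat - 48) 0 +
              PySem.Int.floordiv (PySem.List.pyGetD food i 0) 2)) c
        else c) c).getD j 0
      = c.getD j 0 + ((l.map (fun i => (kOf food i).toNat * cntj j (PySem.Int.toChars i))).sum : Int))
    ∧ (l.foldl (fun c i =>
        if 0 < PySem.Int.floordiv (PySem.List.pyGetD food i 0) 2 then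
          (PySem.Int.toChars i).foldl
            (fun c ch => c.set (ch.toNat - 48) (c.getD (ch.toNat - 48) 0 +
              PySem.Int.floordiv (PySem.List.pyGetD food i 0) 2)) c
        else c) c).length = 10 := by
  intro l
  induction l with
  | nil => intro _ c hc j; simp [hc]
  | cons i t ih =>
    intro hl c hc j
    have hi : 0 ≤ i := hl i List.mem_cons_self
    have ht : ∀ x ∈ t, 0 ≤ x := fun x hx => hl x (List.mem_cons_of_mem _ hx)
    rw [List.foldl_cons]
    by_cases hk : 0 < PySem.Int.floordiv (PySem.List.pyGetD food i 0) 2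
    · rw [if_pos hk]
      obtain ⟨g1, g2⟩ := inner_counts (PySem.Int.floordiv (PySem.List.pyGetD food i 0) 2)
        (PySem.Int.toChars i) (toChars_digits i hi) c hc j
      obtain ⟨f1, f2⟩ := ih ht _ g2 j
      refine ⟨?_, f2⟩
      rw [f1, g1]
      have : ((kOf food i).toNat : Int) = kOf food i := by unfold kOf; omega
      simp only [List.map_cons, List.sum_cons]
      push_cast [this]
      unfold kOf
      ring
    · rw [if_neg hk]
      obtain ⟨f1, f2⟩ := ih ht c hc j
      refine ⟨?_, f2⟩
      rw [f1]
      have : (kOf food i).toNat = 0 := by unfold kOf; omega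
      simp [this]

lemma char_eq_of_toNat {a b : Char} (h : a.toNat = b.toNat) : a = b :=
  Char.ext (UInt32.toNat_inj.mp h)

def totOf (food : List Int) (j : Nat) : Nat :=
  ((PySem.List.pyRange 1 (food.length : Int) 1).map
    (fun i => (kOf food i).toNat * cntj j (PySem.Int.toChars i))).sum

lemma count_repOf (food : List Int) (i : Int) (a : Char) :
    List.count a (repOf food i) = (kOf food i).toNat * List.count a (PySem.Int.toChars i) := by
  unfold repOf PySem.List.pyRepeat
  rw [List.count_flatten, List.map_replicate, List.sum_replicate]
  simp

lemma count_leftOf (food : List Int) (a : Char) :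
    List.count a (leftOf food)
      = ((PySem.List.pyRange 1 (food.length : Int) 1).map
          (fun i => (kOf food i).toNat * List.count a (PySem.Int.toChars i))).sum := by
  unfold leftOf
  rw [List.count_flatMap]
  congr 1
  apply List.map_congr_left
  intro i _
  exact count_repOf food i a

lemma count_leftOf_digit (food : List Int) (j : Nat) (hj : j < 10) (d : Char)
    (hd : d.toNat = 48 + j) :
    List.count d (leftOf food) = totOf food j := by
  rw [count_leftOf]
  unfold totOf
  congr 1
  apply List.map_congr_left
  intro i hi
  have hi1 : (1 : Int) ≤ i := (PySem.List.mem_pyRange_one.mp hi).1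
  congr 1
  rw [List.count_eq_countP]
  unfold cntj
  apply List.countP_congr
  intro ch hch
  have hr := toChars_digits i (by omega) ch hch
  constructor
  · intro h
    have : ch = d := by simpa using h
    subst this
    simp
    omega
  · intro h
    have : ch.toNat - 48 = j := by simpa using h
    have : ch = d := char_eq_of_toNat (by omega)
    simp [this]

lemma count_leftOf_zero (food : List Int) (a : Char)
    (ha : a.toNat < 48 ∨ 57 < a.toNat) :
    List.count a (leftOf food) = 0 := by
  rw [List.count_eq_zero]
  intro hmem
  unfold leftOf at hmem
  obtain ⟨i, hi, hmem2⟩ := List.mem_flatMap.mp hmem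
  have hi1 : (1 : Int) ≤ i := (PySem.List.mem_pyRange_one.mp hi).1
  unfold repOf PySem.List.pyRepeat at hmem2
  obtain ⟨l, hl, hmem3⟩ := List.mem_flatten.mp hmem2
  have : l = PySem.Int.toChars i := (List.eq_of_mem_replicate hl)
  subst this
  have := toChars_digits i (by omega) a hmem3
  omega

def blocksOf (food : List Int) : List Char :=
  List.replicate (totOf food 9) '9' ++ (List.replicate (totOf food 8) '8' ++
  (List.replicate (totOf food 7) '7' ++ (List.replicate (totOf food 6) '6' ++
  (List.replicate (totOf food 5) '5' ++ (List.replicate (totOf food 4) '4' ++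
  (List.replicate (totOf food 3) '3' ++ (List.replicate (totOf food 2) '2' ++
  (List.replicate (totOf food 1) '1' ++ List.replicate (totOf food 0) '0'))))))))

lemma perm_blocks (food : List Int) : (leftOf food).Perm (blocksOf food) := by
  rw [List.perm_iff_count]
  intro a
  unfold blocksOf
  simp only [List.count_append, List.count_replicate]
  by_cases h9 : a = '9'
  · subst h9; rw [count_leftOf_digit food 9 (by norm_num) _ (by decide)]; simp
  by_cases h8 : a = '8'
  · subst h8; rw [count_leftOf_digit food 8 (by norm_num) _ (by decide)]; simp
  by_cases h7 : a = '7'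
  · subst h7; rw [count_leftOf_digit food 7 (by norm_num) _ (by decide)]; simp
  by_cases h6 : a = '6'
  · subst h6; rw [count_leftOf_digit food 6 (by norm_num) _ (by decide)]; simp
  by_cases h5 : a = '5'
  · subst h5; rw [count_leftOf_digit food 5 (by norm_num) _ (by decide)]; simp
  by_cases h4 : a = '4'
  · subst h4; rw [count_leftOf_digit food 4 (by norm_num) _ (by decide)]; simp
  by_cases h3 : a = '3'
  · subst h3; rw [count_leftOf_digit food 3 (by norm_num) _ (by decide)]; simp
  by_cases h2 : a = '2'
  · subst h2; rw [count_leftOf_digit food 2 (by norm_num) _ (by decide)]; simp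
  by_cases h1 : a = '1'
  · subst h1; rw [count_leftOf_digit food 1 (by norm_num) _ (by decide)]; simp
  by_cases h0 : a = '0'
  · subst h0; rw [count_leftOf_digit food 0 (by norm_num) _ (by decide)]; simp
  have hrange : a.toNat < 48 ∨ 57 < a.toNat := by
    by_contra hcon
    push Not at hcon
    obtain ⟨hl, hr⟩ := hcon
    interval_cases h : a.toNat
    · exact h0 (char_eq_of_toNat (by rw [h]; rfl))
    · exact h1 (char_eq_of_toNat (by rw [h]; rfl))
    · exact h2 (char_eq_of_toNat (by rw [h]; rfl))
    · exact h3 (char_eq_of_toNat (by rw [h]; rfl))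
    · exact h4 (char_eq_of_toNat (by rw [h]; rfl))
    · exact h5 (char_eq_of_toNat (by rw [h]; rfl))
    · exact h6 (char_eq_of_toNat (by rw [h]; rfl))
    · exact h7 (char_eq_of_toNat (by rw [h]; rfl))
    · exact h8 (char_eq_of_toNat (by rw [h]; rfl))
    · exact h9 (char_eq_of_toNat (by rw [h]; rfl))
  rw [count_leftOf_zero food a hrange]
  have : ∀ (c : Char), c ≠ a → (if (c == a) = true then 1 else 0) = 0 := by
    intro c hc; simp [hc]
  simp [beq_iff_eq, Ne.symm h9, Ne.symm h8, Ne.symm h7, Ne.symm h6, Ne.symm h5,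
    Ne.symm h4, Ne.symm h3, Ne.symm h2, Ne.symm h1, Ne.symm h0]

lemma pairwise_desc_flatten (cs : List Char) (f : Char → Nat)
    (h : cs.Pairwise (fun a b => b.toNat ≤ a.toNat)) :
    (cs.map (fun c => List.replicate (f c) c)).flatten.Pairwise (fun a b => b.toNat ≤ a.toNat) := by
  rw [List.pairwise_flatten]
  constructor
  · intro l hl
    obtain ⟨p, _, rfl⟩ := List.mem_map.mp hl
    rw [List.pairwise_replicate]
    right; omega
  · rw [List.pairwise_map]
    apply h.imp
    intro p q hpq x hx y hy
    rw [List.eq_of_mem_replicate hx, List.eq_of_mem_replicate hy]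
    exact hpq

lemma pairwise_blocks (food : List Int) :
    (blocksOf food).Pairwise (fun a b => b.toNat ≤ a.toNat) := by
  have h := pairwise_desc_flatten ['9','8','7','6','5','4','3','2','1','0']
    (fun c => totOf food (c.toNat - 48)) (by decide)
  simpa [blocksOf, List.map_cons, List.flatten_cons] using h

lemma sorted_eq_blocks (food : List Int) :
    PySem.List.sorted (leftOf food) (fun c => c) true = blocksOf food := by
  apply PySem.List.eq_of_perm_of_pairwise_le_of_injective (fun c : Char => -(c.toNat : Int))
  · intro a b h
    simp only at h
    exact char_eq_of_toNat (by omega)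
  · exact (PySem.List.sorted_perm (leftOf food) (fun c => c) true).trans (perm_blocks food)
  · apply (PySem.List.sorted_pairwise_rev (leftOf food) (fun c => c)).imp
    intro a b h
    have h2 : b.toNat ≤ a.toNat := h
    omega
  · apply (pairwise_blocks food).imp
    intro a b h
    omega

lemma right_eq (food : List Int) (C : List Int)
    (hC : ∀ j : Nat, j < 10 → C.getD j 0 = (totOf food j : Int)) :
    (PySem.List.pyRange 9 (-1) (-1)).foldl
      (fun acc d => acc ++ PySem.List.pyRepeat (PySem.Int.toChars d) (C.getD d.toNat 0)) []
      = blocksOf food := by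
  have hrange : PySem.List.pyRange 9 (-1) (-1) = [9,8,7,6,5,4,3,2,1,0] := by decide
  rw [hrange]
  simp only [List.foldl_cons, List.foldl_nil, List.nil_append]
  have h9 : PySem.Int.toChars 9 = ['9'] := by decide
  have h8 : PySem.Int.toChars 8 = ['8'] := by decide
  have h7 : PySem.Int.toChars 7 = ['7'] := by decide
  have h6 : PySem.Int.toChars 6 = ['6'] := by decide
  have h5 : PySem.Int.toChars 5 = ['5'] := by decide
  have h4 : PySem.Int.toChars 4 = ['4'] := by decide
  have h3 : PySem.Int.toChars 3 = ['3'] := by decide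
  have h2 : PySem.Int.toChars 2 = ['2'] := by decide
  have h1 : PySem.Int.toChars 1 = ['1'] := by decide
  have h0 : PySem.Int.toChars 0 = ['0'] := by decide
  have t9 : ((9:Int)).toNat = 9 := by decide
  have t8 : ((8:Int)).toNat = 8 := by decide
  have t7 : ((7:Int)).toNat = 7 := by decide
  have t6 : ((6:Int)).toNat = 6 := by decide
  have t5 : ((5:Int)).toNat = 5 := by decide
  have t4 : ((4:Int)).toNat = 4 := by decide
  have t3 : ((3:Int)).toNat = 3 := by decide
  have t2 : ((2:Int)).toNat = 2 := by decide
  have t1 : ((1:Int)).toNat = 1 := by decide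
  have t0 : ((0:Int)).toNat = 0 := by decide
  rw [h9, h8, h7, h6, h5, h4, h3, h2, h1, h0, t9, t8, t7, t6, t5, t4, t3, t2, t1, t0]
  rw [hC 9 (by norm_num), hC 8 (by norm_num), hC 7 (by norm_num), hC 6 (by norm_num),
      hC 5 (by norm_num), hC 4 (by norm_num), hC 3 (by norm_num), hC 2 (by norm_num),
      hC 1 (by norm_num), hC 0 (by norm_num)]
  simp only [PySem.List.pyRepeat_singleton, Int.toNat_natCast]
  simp [blocksOf, List.append_assoc]

lemma alt_eq (food : List Int) :
    solution_alt food = String.ofList ((leftOf food ++ ['0']) ++ blocksOf food) := by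
  unfold solution_alt
  dsimp only
  rw [PySem.List.foldl_congr_mem _ _
    (fun (st : List Int × List (List Char)) i =>
      (if 0 < PySem.Int.floordiv (PySem.List.pyGetD food i 0) 2 then
        (PySem.Int.toChars i).foldl
          (fun c ch => c.set (ch.toNat - 48) (c.getD (ch.toNat - 48) 0 +
            PySem.Int.floordiv (PySem.List.pyGetD food i 0) 2)) st.1
       else st.1,
       if 0 < PySem.Int.floordiv (PySem.List.pyGetD food i 0) 2 then
        st.2 ++ [PySem.List.pyRepeat (PySem.Int.toChars i)
          (PySem.Int.floordiv (PySem.List.pyGetD food i 0) 2)]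
       else st.2)) _
    (by intro acc i _; dsimp only; split <;> rfl)]
  have key := PySem.List.foldl_prod_mk
    (f := fun (c : List Int) (i : Int) =>
      if 0 < PySem.Int.floordiv (PySem.List.pyGetD food i 0) 2 then
        (PySem.Int.toChars i).foldl
          (fun c ch => c.set (ch.toNat - 48) (c.getD (ch.toNat - 48) 0 +
            PySem.Int.floordiv (PySem.List.pyGetD food i 0) 2)) c
      else c)
    (g := fun (p : List (List Char)) (i : Int) =>
      if 0 < PySem.Int.floordiv (PySem.List.pyGetD food i 0) 2 then
        p ++ [PySem.List.pyRepeat (PySem.Int.toChars i)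
          (PySem.Int.floordiv (PySem.List.pyGetD food i 0) 2)]
      else p)
    (l := PySem.List.pyRange 1 (food.length : Int) 1)
    (a := List.replicate 10 (0 : Int)) (b := ([] : List (List Char)))
  rw [key]
  have hpos : ∀ i ∈ PySem.List.pyRange 1 (food.length : Int) 1, (0:Int) ≤ i := by
    intro i hi; have := (PySem.List.mem_pyRange_one.mp hi).1; omega
  have hcounts := outer_counts food (PySem.List.pyRange 1 (food.length : Int) 1) hpos
    (List.replicate 10 (0:Int)) (by simp)
  have hget : ∀ j : Nat, j < 10 →
      ((PySem.List.pyRange 1 (food.length : Int) 1).foldl (fun c i =>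
        if 0 < PySem.Int.floordiv (PySem.List.pyGetD food i 0) 2 then
          (PySem.Int.toChars i).foldl
            (fun c ch => c.set (ch.toNat - 48) (c.getD (ch.toNat - 48) 0 +
              PySem.Int.floordiv (PySem.List.pyGetD food i 0) 2)) c
        else c) (List.replicate 10 (0:Int))).getD j 0 = (totOf food j : Int) := by
    intro j hj
    rw [(hcounts j).1]
    rw [List.getD_eq_getElem?_getD]
    simp [hj, totOf]
    interval_cases j <;> rfl
  rw [parts_inv food, right_eq food _ hget]


-- ===== VERDICT =====
theorem solution_spec : Claim_equal_solution := by
  intro food _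
  unfold Spec_solution
  rw [solution_eq, alt_eq, sorted_eq_blocks]
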